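-- pv_equiv track=rewrite | github.com/sk0g/Word-Guessing-Game | solution.py | get_biggest_category_index
-- ===== SOURCE A (Python) =====
-- def get_biggest_category_index(guess_char, word_list):
--     word_len = len(word_list[0])
--     occurences_list = [0] * (word_len + 1)
--     for word in word_list:
--         num = word.find(guess_char)
--         occurences_list[num] += 1
--     most_common, highest_val = 0, 0
--     for i in range(word_len + 1):  # Find the most common length
--         if occurences_list[i] > highest_val:
--             highest_val = occurences_list[i]
--             most_common = i
--     if most_common == word_len:
--         most_common = -1
--     return most_common
-- ===== SOURCE B (Python) =====
-- def get_biggest_category_index(guess_char, word_list):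
--     word_len = len(word_list[0])
--     buckets = []
--     for word in word_list:
--         idx = word.find(guess_char)
--         buckets.append(word_len if idx == -1 else idx)
--     buckets.sort()
--     best, best_run = 0, 0
--     run, prev = 0, None
--     for v in buckets:
--         run = run + 1 if v == prev else 1
--         prev = v
--         if run > best_run:
--             best, best_run = v, run
--     return -1 if best == word_len else best
-- ===== Notes on version B (the rewrite author's own statement) =====
-- stated objective: alternative
-- what changed: B replaces A's histogram array + argmax scan over all slots by sort-then-scan: it maps each word to its bucket index (word_len for not-found), sorts the bucket list, and finds the mode by counting consecutive equal runs (ascending order + strict > reproduces A's lowest-index tie-break), then remaps word_len to -1.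
-- outside the precondition, e.g. on get_biggest_category_index('a', []): A raises IndexError, B raises IndexError; on get_biggest_category_index('a', ['bb', 'bbbba']): A raises IndexError, B returns -1
import Mathlib
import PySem

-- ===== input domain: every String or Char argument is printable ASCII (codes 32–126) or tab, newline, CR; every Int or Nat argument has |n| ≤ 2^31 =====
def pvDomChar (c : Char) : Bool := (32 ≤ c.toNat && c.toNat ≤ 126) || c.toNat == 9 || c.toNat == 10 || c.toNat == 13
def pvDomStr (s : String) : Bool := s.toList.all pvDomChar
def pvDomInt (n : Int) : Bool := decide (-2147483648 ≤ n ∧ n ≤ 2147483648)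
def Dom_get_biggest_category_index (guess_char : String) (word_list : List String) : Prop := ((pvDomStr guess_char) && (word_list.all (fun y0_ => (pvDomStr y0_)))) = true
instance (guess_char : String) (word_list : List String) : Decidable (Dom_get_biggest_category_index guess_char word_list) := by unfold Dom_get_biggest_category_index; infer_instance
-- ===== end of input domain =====

-- B replaces A's histogram + argmax scan by sort-then-scan over consecutive equal runs; same return value on Pre_.


-- ===== PORT A =====
def get_biggest_category_index (guess_char : String) (word_list : List String) : Int :=
  let word_len : Int := PySem.Str.len (PySem.List.pyGetD word_list 0 "")
  let occ0 : List Int := List.replicate (word_len + 1).toNat 0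
  let occ : List Int := word_list.foldl
    (fun occ w =>
      let num := PySem.Str.find w guess_char
      PySem.List.pySetD occ num (PySem.List.pyGetD occ num 0 + 1)) occ0
  let p : Int × Int := (PySem.List.pyRange 0 (word_len + 1)).foldl
    (fun p i => if PySem.List.pyGetD occ i 0 > p.2 then (i, PySem.List.pyGetD occ i 0) else p)
    (0, 0)
  if p.1 = word_len then -1 else p.1

-- ===== PORT B =====
-- B-side helper: the body of Source B's run-scan loop (state = (best, best_run, run, prev))
def rsStep (st : Int × Int × Int × Option Int) (v : Int) : Int × Int × Int × Option Int :=
  let run := if some v = st.2.2.2 then st.2.2.1 + 1 else 1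
  if run > st.2.1 then (v, run, run, some v) else (st.1, st.2.1, run, some v)

def get_biggest_category_index_alt (guess_char : String) (word_list : List String) : Int :=
  let word_len : Int := PySem.Str.len (PySem.List.pyGetD word_list 0 "")
  let buckets : List Int := word_list.foldl
    (fun buckets w =>
      let idx := PySem.Str.find w guess_char
      buckets ++ [if idx = -1 then word_len else idx]) []
  let bsorted : List Int := PySem.List.sorted buckets (fun x => x) false
  let st := bsorted.foldl rsStep ((0 : Int), (0 : Int), (0 : Int), (none : Option Int))
  if st.1 = word_len then -1 else st.1

-- ===== PRECONDITION & SPEC =====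
-- Pre_ excludes exactly the inputs on which A raises IndexError: the empty list (word_list[0]),
-- and lists where some word finds guess_char at an index beyond len(word_list[0]) (the histogram write lands out of range).
def Pre_get_biggest_category_index (guess_char : String) (word_list : List String) : Prop :=
  word_list ≠ [] ∧
    ∀ w ∈ word_list, PySem.Str.find w guess_char ≤ PySem.Str.len (PySem.List.pyGetD word_list 0 "")
instance (guess_char : String) (word_list : List String) : Decidable (Pre_get_biggest_category_index guess_char word_list) := by unfold Pre_get_biggest_category_index; infer_instance
def pvWitness_get_biggest_category_index : String × List String := ("a", ["abc", "bca", "cab"])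

def Spec_get_biggest_category_index (guess_char : String) (word_list : List String) (out : Int) : Prop := out = get_biggest_category_index_alt guess_char word_list
instance (guess_char : String) (word_list : List String) (out : Int) : Decidable (Spec_get_biggest_category_index guess_char word_list out) := by unfold Spec_get_biggest_category_index; infer_instance

-- ===== CLAIM (what is proved, stated in full; the proofs are below) =====
def Claim_equal_get_biggest_category_index : Prop := ∀ (guess_char : String) (word_list : List String), Dom_get_biggest_category_index guess_char word_list → Pre_get_biggest_category_index guess_char word_list → Spec_get_biggest_category_index guess_char word_list (get_biggest_category_index guess_char word_list)

-- ===== LEMMAS AND PROOFS =====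

-- ---- A-side: find ≥ -1, and the histogram fold counts buckets ----
theorem find_go_ge (sub : List Char) : ∀ (s : List Char) (k : Nat), -1 ≤ PySem.Chars.find.go sub s k := by
  intro s
  induction s with
  | nil =>
    intro k; simp [PySem.Chars.find.go]; split <;> omega
  | cons h t ih =>
    intro k
    simp [PySem.Chars.find.go]
    split
    · omega
    · exact ih (k + 1)

theorem find_ge (w g : String) : -1 ≤ PySem.Str.find w g := by
  simpa [PySem.Str.find, PySem.Chars.find] using find_go_ge g.toList w.toList 0

theorem step_get (occ : List Int) (num : Int) (i n : Nat)
    (hlen : occ.length = n + 1) (h1 : -1 ≤ num) (h2 : num ≤ (n : Int)) (hi : i ≤ n) :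
    PySem.List.pyGetD (PySem.List.pySetD occ num (PySem.List.pyGetD occ num 0 + 1)) (i : Int) 0
      = PySem.List.pyGetD occ (i : Int) 0
        + (if (if num = -1 then (n : Int) else num) = (i : Int) then 1 else 0) := by
  by_cases hneg : num = -1
  · subst hneg
    have hset : PySem.List.pySetD occ (-1) (PySem.List.pyGetD occ (-1) 0 + 1)
        = occ.set n (PySem.List.pyGetD occ (-1) 0 + 1) := by
      simp [PySem.List.pySetD, PySem.List.pySet?, PySem.List.pyIdx?, hlen]
    have hget : PySem.List.pyGetD occ (-1) 0 = occ.getD n 0 := by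
      have := PySem.List.pyGetD_neg_natCast occ 1 0 (by omega) (by omega)
      simpa [hlen] using this
    rw [hset, hget]
    simp only [PySem.List.pyGetD_natCast, reduceIte]
    rcases Nat.lt_or_ge i n with h | h
    · rw [if_neg (by omega : ¬ ((n : Int)) = (i : Int))]
      simp [List.getD, List.getElem?_set_ne (by omega : n ≠ i)]
    · have : i = n := by omega
      subst this
      rw [if_pos rfl]
      simp [List.getD, hlen]
  · have h0 : 0 ≤ num := by omega
    obtain ⟨m, rfl⟩ : ∃ m : Nat, num = (m : Int) := ⟨num.toNat, by omega⟩
    have hm : m < occ.length := by omega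
    rw [PySem.List.pyGetD_pySetD_natCast occ m i _ 0 hm]
    rw [if_neg (by omega : ¬ ((m : Int)) = -1)]
    by_cases hmi : i = m
    · subst hmi; simp
    · rw [if_neg hmi, if_neg (by omega : ¬ ((m : Int)) = (i : Int))]
      ring

theorem fold_occ (g : String) (n : Nat) :
    ∀ (ws : List String) (occ : List Int), occ.length = n + 1 →
      (∀ w ∈ ws, PySem.Str.find w g ≤ (n : Int)) → ∀ i : Nat, i ≤ n →
      PySem.List.pyGetD
        (ws.foldl (fun occ w =>
            PySem.List.pySetD occ (PySem.Str.find w g)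
              (PySem.List.pyGetD occ (PySem.Str.find w g) 0 + 1)) occ) (i : Int) 0
        = PySem.List.pyGetD occ (i : Int) 0
          + ((ws.map (fun w => if PySem.Str.find w g = -1 then (n : Int) else PySem.Str.find w g)).count (i : Int) : Int) := by
  intro ws
  induction ws with
  | nil => intro occ _ _ i _; simp
  | cons w ws ih =>
    intro occ hlen hall i hi
    simp only [List.foldl_cons, List.map_cons]
    rw [ih _ (by rw [PySem.List.length_pySetD]; exact hlen)
          (fun x hx => hall x (List.mem_cons_of_mem _ hx)) i hi]
    rw [step_get occ _ i n hlen (find_ge w g) (hall w (List.mem_cons_self)) hi]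
    rw [List.count_cons]
    by_cases h : (if PySem.Str.find w g = -1 then (n : Int) else PySem.Str.find w g) = (i : Int)
    · simp only [h, beq_self_eq_true, if_true]; push_cast; ring
    · rw [if_neg h, if_neg (by simpa using h)]; push_cast; ring

-- ---- the common argmax fold ----
def amFold (c : Int → Int) (l : List Int) (p : Int × Int) : Int × Int :=
  l.foldl (fun p i => if c i > p.2 then (i, c i) else p) p

theorem amFold_filter (c : Int → Int) (hc : ∀ i, 0 ≤ c i) :
    ∀ (l : List Int) (p : Int × Int), 0 ≤ p.2 →
      amFold c l p = amFold c (l.filter (fun i => decide (c i ≠ 0))) p := by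
  intro l
  induction l with
  | nil => intro p _; rfl
  | cons i l ih =>
    intro p hp
    by_cases h : c i = 0
    · have hf : List.filter (fun i => decide (c i ≠ 0)) (i :: l)
          = List.filter (fun i => decide (c i ≠ 0)) l := by simp [h]
      unfold amFold at ih ⊢
      rw [hf, List.foldl_cons, if_neg (by omega : ¬ c i > p.2)]
      exact ih p hp
    · have hf : List.filter (fun i => decide (c i ≠ 0)) (i :: l)
          = i :: List.filter (fun i => decide (c i ≠ 0)) l := by simp [h]
      unfold amFold at ih ⊢
      rw [hf, List.foldl_cons, List.foldl_cons]
      by_cases hgt : c i > p.2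
      · rw [if_pos hgt]; exact ih (i, c i) (hc i)
      · rw [if_neg hgt]; exact ih p hp

-- ---- grouping a sorted list into runs ----
def toGroups : List Int → List (Int × Nat)
  | [] => []
  | v :: t => (v, (t.takeWhile (fun x => x == v)).length + 1) :: toGroups (t.dropWhile (fun x => x == v))
termination_by l => l.length
decreasing_by
  simp only [List.length_cons]
  have := List.length_dropWhile_le (fun x => x == v) t
  omega

def ungroup (gs : List (Int × Nat)) : List Int := gs.flatMap (fun g => List.replicate g.2 g.1)

theorem ungroup_toGroups : ∀ (s : List Int), ungroup (toGroups s) = s := by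
  intro s
  induction s using toGroups.induct with
  | case1 => rw [toGroups]; rfl
  | case2 v t ih =>
    rw [toGroups]
    simp only [ungroup, List.flatMap_cons]
    have ih' : (toGroups (t.dropWhile (fun x => x == v))).flatMap (fun g => List.replicate g.2 g.1)
        = t.dropWhile (fun x => x == v) := ih
    rw [ih']
    have htw : t.takeWhile (fun x => x == v)
        = List.replicate (t.takeWhile (fun x => x == v)).length v := by
      apply List.eq_replicate_of_mem
      intro b hb
      simpa using List.mem_takeWhile_imp hb
    rw [List.replicate_succ, List.cons_append]
    conv_lhs => rw [← htw]
    rw [List.takeWhile_append_dropWhile]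

theorem sorted_dropWhile_gt (v : Int) (t : List Int) (hs : (v :: t).Pairwise (· ≤ ·)) :
    ∀ x ∈ t.dropWhile (fun x => x == v), v < x := by
  induction t with
  | nil => intro x hx; cases hx
  | cons a t ih =>
    intro x hx
    by_cases ha : (a == v) = true
    · have hav : a = v := by simpa using ha
      rw [List.dropWhile_cons, if_pos ha] at hx
      have hs' : (v :: t).Pairwise (· ≤ ·) := by
        subst hav
        exact (List.pairwise_cons.mp hs).2
      exact ih hs' x hx
    · rw [List.dropWhile_cons, if_neg ha] at hx
      have hva : v < a := by
        have hle : v ≤ a := (List.pairwise_cons.mp hs).1 a List.mem_cons_self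
        have : a ≠ v := by simpa using ha
        exact lt_of_le_of_ne hle (Ne.symm this)
      rcases List.mem_cons.mp hx with rfl | hx'
      · exact hva
      · have hax : a ≤ x :=
          (List.pairwise_cons.mp (List.pairwise_cons.mp hs).2).1 x hx'
        exact lt_of_lt_of_le hva hax

theorem mem_toGroups_mem : ∀ (s : List Int) (g : Int × Nat), g ∈ toGroups s → g.1 ∈ s := by
  intro s
  induction s using toGroups.induct with
  | case1 => intro g hg; rw [toGroups] at hg; cases hg
  | case2 v t ih =>
    intro g hg
    rw [toGroups] at hg
    rcases List.mem_cons.mp hg with rfl | hg'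
    · exact List.mem_cons_self
    · have := ih g hg'
      exact List.mem_cons_of_mem _ ((List.dropWhile_sublist _).subset this)

theorem mem_mem_toGroups : ∀ (s : List Int) (x : Int), x ∈ s → x ∈ (toGroups s).map (·.1) := by
  intro s
  induction s using toGroups.induct with
  | case1 => intro x hx; cases hx
  | case2 v t ih =>
    intro x hx
    rw [toGroups]
    rcases List.mem_cons.mp hx with rfl | hx'
    · simp
    · rw [← List.takeWhile_append_dropWhile (p := fun x => x == v) (l := t)] at hx'
      rcases List.mem_append.mp hx' with h1 | h2
      · have : x = v := by simpa using List.mem_takeWhile_imp h1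
        subst this; simp
      · simp only [List.map_cons]
        exact List.mem_cons_of_mem _ (ih x h2)

theorem toGroups_pairwise : ∀ (s : List Int), s.Pairwise (· ≤ ·) →
    (toGroups s).Pairwise (fun g h => g.1 < h.1) := by
  intro s
  induction s using toGroups.induct with
  | case1 => intro _; simp [toGroups]
  | case2 v t ih =>
    intro hs
    rw [toGroups]
    have hu : (t.dropWhile (fun x => x == v)).Pairwise (· ≤ ·) :=
      (List.pairwise_cons.mp hs).2.sublist (List.dropWhile_sublist _)
    refine List.pairwise_cons.mpr ⟨?_, ih hu⟩
    intro g hg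
    exact sorted_dropWhile_gt v t hs g.1 (mem_toGroups_mem _ g hg)

theorem toGroups_pos : ∀ (s : List Int), ∀ g ∈ toGroups s, 1 ≤ g.2 := by
  intro s
  induction s using toGroups.induct with
  | case1 => intro g hg; rw [toGroups] at hg; cases hg
  | case2 v t ih =>
    intro g hg
    rw [toGroups] at hg
    rcases List.mem_cons.mp hg with rfl | hg'
    · simp
    · exact ih g hg' 

theorem toGroups_count : ∀ (s : List Int), s.Pairwise (· ≤ ·) →
    ∀ g ∈ toGroups s, g.2 = s.count g.1 := by
  intro s
  induction s using toGroups.induct with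
  | case1 => intro _ g hg; rw [toGroups] at hg; cases hg
  | case2 v t ih =>
    intro hs g hg
    have ht : t = t.takeWhile (fun x => x == v) ++ t.dropWhile (fun x => x == v) :=
      (List.takeWhile_append_dropWhile).symm
    have htw : t.takeWhile (fun x => x == v)
        = List.replicate (t.takeWhile (fun x => x == v)).length v := by
      apply List.eq_replicate_of_mem
      intro b hb
      simpa using List.mem_takeWhile_imp hb
    have hugt : ∀ x ∈ t.dropWhile (fun x => x == v), v < x := sorted_dropWhile_gt v t hs
    rw [toGroups] at hg
    rcases List.mem_cons.mp hg with rfl | hg'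
    · simp only
      conv_rhs => rw [ht]
      rw [List.count_cons, List.count_append, htw, List.count_replicate_self]
      have : (t.dropWhile (fun x => x == v)).count v = 0 := by
        rw [List.count_eq_zero]
        intro hmem
        exact absurd rfl (ne_of_gt (hugt v hmem))
      rw [this]
      simp
    · have hu : (t.dropWhile (fun x => x == v)).Pairwise (· ≤ ·) :=
        (List.pairwise_cons.mp hs).2.sublist (List.dropWhile_sublist _)
      have hgu := ih hu g hg'
      have hg1 : v < g.1 := hugt g.1 (mem_toGroups_mem _ g hg')
      rw [hgu]
      conv_rhs => rw [ht]
      rw [List.count_cons, List.count_append, htw, List.count_replicate]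
      have h1 : ¬ (v == g.1) = true := by simpa using (ne_of_gt hg1).symm
      have h2 : ¬ (g.1 == v) = true := by simpa using ne_of_gt hg1
      simp [h1]

-- ---- the run-scan fold over grouped input ----
theorem rs_replicate : ∀ (k : Nat) (v : Int) (t : List Int) (b br r : Int), r ≤ br →
    (List.replicate k v ++ t).foldl rsStep (b, br, r, some v)
      = t.foldl rsStep (if r + k > br then (v, r + k, r + k, some v) else (b, br, r + (k : Int), some v)) := by
  intro k
  induction k with
  | zero =>
    intro v t b br r h
    simp only [List.replicate, List.nil_append, Nat.cast_zero, add_zero]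
    rw [if_neg (by omega)]
  | succ k ih =>
    intro v t b br r h
    rw [List.replicate_succ, List.cons_append, List.foldl_cons]
    have hstep : rsStep (b, br, r, some v) v
        = if r + 1 > br then (v, r + 1, r + 1, some v) else (b, br, r + 1, some v) := by
      simp [rsStep]
    rw [hstep]
    by_cases hc : r + 1 > br
    · rw [if_pos hc, ih v t v (r + 1) (r + 1) le_rfl]
      congr 1
      by_cases hk : (k : Int) > 0
      · rw [if_pos (by omega), if_pos (by push_cast; omega)]
        push_cast
        ring_nf
      · have hk0 : k = 0 := by omega
        subst hk0
        rw [if_neg (by push_cast; omega), if_pos (by push_cast; omega)]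
        push_cast
        ring_nf
    · rw [if_neg hc, ih v t b br (r + 1) (by omega)]
      congr 1
      by_cases hk : r + 1 + (k : Int) > br
      · rw [if_pos hk, if_pos (by push_cast; omega)]
        push_cast
        ring_nf
      · rw [if_neg hk, if_neg (by push_cast; omega)]
        push_cast
        ring_nf

theorem rs_enter : ∀ (k : Nat) (v : Int) (t : List Int) (b br r : Int) (prev : Option Int),
    prev ≠ some v → 0 ≤ br → 1 ≤ k →
    (List.replicate k v ++ t).foldl rsStep (b, br, r, prev)
      = t.foldl rsStep (if (k : Int) > br then (v, k, k, some v) else (b, br, (k : Int), some v)) := by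
  intro k v t b br r prev hprev hbr hk
  obtain ⟨k', rfl⟩ : ∃ k', k = k' + 1 := ⟨k - 1, by omega⟩
  rw [List.replicate_succ, List.cons_append, List.foldl_cons]
  have hstep : rsStep (b, br, r, prev) v
      = if 1 > br then (v, 1, 1, some v) else (b, br, 1, some v) := by
    simp [rsStep, Ne.symm hprev]
  rw [hstep]
  by_cases h1 : (1 : Int) > br
  · rw [if_pos h1, rs_replicate k' v t v 1 1 le_rfl]
    congr 1
    rw [if_pos (show ((k' + 1 : Nat) : Int) > br by push_cast; omega)]
    by_cases hk' : (k' : Int) > 0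
    · rw [if_pos (show (1 : Int) + (k' : Int) > 1 by omega)]
      push_cast
      ring_nf
    · have hk0 : k' = 0 := by omega
      subst hk0
      rw [if_neg (show ¬ ((1 : Int) + ((0 : Nat) : Int) > 1) by norm_num)]
      push_cast
      ring_nf
  · rw [if_neg h1, rs_replicate k' v t b br 1 (by omega)]
    congr 1
    by_cases hk2 : 1 + (k' : Int) > br
    · rw [if_pos hk2, if_pos (show ((k' + 1 : Nat) : Int) > br by push_cast; omega)]
      push_cast
      ring_nf
    · rw [if_neg hk2, if_neg (show ¬ (((k' + 1 : Nat) : Int) > br) by push_cast; omega)]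
      push_cast
      ring_nf

def gFold (gs : List (Int × Nat)) (p : Int × Int) : Int × Int :=
  gs.foldl (fun p g => if (g.2 : Int) > p.2 then (g.1, (g.2 : Int)) else p) p

theorem rs_main : ∀ (gs : List (Int × Nat)) (b br r : Int) (prev : Option Int),
    0 ≤ br → (∀ g ∈ gs, 1 ≤ g.2) → (∀ g ∈ gs, prev ≠ some g.1) →
    gs.Pairwise (fun g h => g.1 < h.1) →
    ((ungroup gs).foldl rsStep (b, br, r, prev)).1 = (gFold gs (b, br)).1 := by
  intro gs
  induction gs with
  | nil => intro b br r prev _ _ _ _; simp [ungroup, gFold]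
  | cons g gs ih =>
    intro b br r prev hbr hpos hprev hpw
    obtain ⟨v, k⟩ := g
    have hpv : prev ≠ some v := hprev _ List.mem_cons_self
    have hk1 : 1 ≤ k := hpos _ List.mem_cons_self
    simp only [ungroup, List.flatMap_cons]
    rw [rs_enter k v _ b br r prev hpv hbr hk1]
    have hvlt : ∀ g' ∈ gs, v < g'.1 := (List.pairwise_cons.mp hpw).1
    have hprev' : ∀ g' ∈ gs, (some v : Option Int) ≠ some g'.1 := by
      intro g' hg' h
      exact absurd (Option.some.inj h) (ne_of_lt (hvlt g' hg'))
    have hgf : gFold ((v, k) :: gs) (b, br)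
        = gFold gs (if (k : Int) > br then (v, (k : Int)) else (b, br)) := by
      simp [gFold]
    rw [hgf]
    have hposT : ∀ g' ∈ gs, 1 ≤ g'.2 := fun g' hg' => hpos g' (List.mem_cons_of_mem _ hg')
    have hpwT := (List.pairwise_cons.mp hpw).2
    by_cases hk : (k : Int) > br
    · rw [if_pos hk, if_pos hk]
      have := ih v (k : Int) (k : Int) (some v) (Int.natCast_nonneg k) hposT hprev' hpwT
      simpa [ungroup] using this
    · rw [if_neg hk, if_neg hk]
      have := ih b br (k : Int) (some v) hbr hposT hprev' hpwT
      simpa [ungroup] using this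

theorem gFold_amFold (c : Int → Int) : ∀ (gs : List (Int × Nat)) (p : Int × Int),
    (∀ g ∈ gs, (g.2 : Int) = c g.1) → gFold gs p = amFold c (gs.map (·.1)) p := by
  intro gs
  induction gs with
  | nil => intro p _; rfl
  | cons g gs ih =>
    intro p hc
    have h1 : ((g.2 : Nat) : Int) = c g.1 := hc g List.mem_cons_self
    simp only [gFold, amFold, List.map_cons, List.foldl_cons, h1]
    exact ih _ (fun g' hg' => hc g' (List.mem_cons_of_mem _ hg'))

-- ---- main equality ----
theorem main_eq (g : String) (ws : List String)
    (hall : ∀ w ∈ ws, PySem.Str.find w g ≤ PySem.Str.len (PySem.List.pyGetD ws 0 "")) :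
    get_biggest_category_index g ws = get_biggest_category_index_alt g ws := by
  unfold get_biggest_category_index get_biggest_category_index_alt
  simp only []
  set w0 := PySem.List.pyGetD ws 0 "" with hw0
  set n : Nat := w0.toList.length with hn
  have hwl : PySem.Str.len w0 = (n : Int) := PySem.Str.len_eq w0
  rw [hwl] at hall ⊢
  -- Source B's append loop builds the bucket list = map
  have hbuild : ws.foldl (fun bk w =>
      let idx := PySem.Str.find w g
      bk ++ [if idx = -1 then (n : Int) else idx]) ([] : List Int)
      = ws.map (fun w => if PySem.Str.find w g = -1 then (n : Int) else PySem.Str.find w g) := by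
    simpa using PySem.List.foldl_append_singleton_eq_map (l := ws)
      (f := fun w => if PySem.Str.find w g = -1 then (n : Int) else PySem.Str.find w g) (acc := [])
  rw [hbuild]
  set buckets0 := ws.map (fun w => if PySem.Str.find w g = -1 then (n : Int) else PySem.Str.find w g) with hb
  set s := PySem.List.sorted buckets0 (fun x => x) false with hsdef
  have hsperm : s.Perm buckets0 := PySem.List.sorted_perm buckets0 (fun x => x) false
  have hssort : s.Pairwise (· ≤ ·) := by
    simpa using PySem.List.sorted_pairwise (xs := buckets0) (key := fun x => x)
  set c : Int → Int := fun i => (buckets0.count i : Int) with hc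
  have hc0 : ∀ i, 0 ≤ c i := fun i => Int.natCast_nonneg _
  have hbnd : ∀ x ∈ buckets0, 0 ≤ x ∧ x ≤ (n : Int) := by
    intro x hx
    rw [hb] at hx
    obtain ⟨w, hw, rfl⟩ := List.mem_map.mp hx
    by_cases hf : PySem.Str.find w g = -1
    · rw [if_pos hf]
      exact ⟨Int.natCast_nonneg n, le_rfl⟩
    · rw [if_neg hf]
      have h1 := find_ge w g
      exact ⟨by omega, hall w hw⟩
  -- A's histogram entries are the bucket counts
  have hlen0 : (List.replicate (((n : Int) + 1)).toNat (0 : Int)).length = n + 1 := by simp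
  set occ : List Int := ws.foldl (fun occ w =>
      PySem.List.pySetD occ (PySem.Str.find w g)
        (PySem.List.pyGetD occ (PySem.Str.find w g) 0 + 1)) (List.replicate ((n : Int) + 1).toNat 0) with hoccdef
  have hocc : ∀ i : Nat, i ≤ n → PySem.List.pyGetD occ (i : Int) 0 = c i := by
    intro i hi
    rw [hoccdef, fold_occ g n ws _ hlen0 hall i hi, ← hb, PySem.List.pyGetD_natCast]
    simp [hc]
  -- A's argmax loop is amFold c over the range
  have hA : (PySem.List.pyRange 0 ((n : Int) + 1)).foldl
      (fun p i => if PySem.List.pyGetD occ i 0 > p.2 then (i, PySem.List.pyGetD occ i 0) else p)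
      ((0 : Int), (0 : Int))
      = amFold c (PySem.List.pyRange 0 ((n : Int) + 1)) (0, 0) := by
    unfold amFold
    apply List.foldl_ext
    intro p i hi
    rw [PySem.List.mem_pyRange_one] at hi
    obtain ⟨m, rfl⟩ : ∃ m : Nat, i = (m : Int) := ⟨i.toNat, by omega⟩
    rw [hocc m (by omega)]
  -- B's run scan is the grouped argmax
  have hB1 : (s.foldl rsStep ((0 : Int), (0 : Int), (0 : Int), (none : Option Int))).1
      = (gFold (toGroups s) (0, 0)).1 := by
    conv_lhs => rw [← ungroup_toGroups s]
    exact rs_main (toGroups s) 0 0 0 none le_rfl (toGroups_pos s)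
      (fun g' _ => by simp) (toGroups_pairwise s hssort)
  have hcnt : ∀ g' ∈ toGroups s, ((g'.2 : Nat) : Int) = c g'.1 := by
    intro g' hg'
    rw [toGroups_count s hssort g' hg', hsperm.count_eq]
  have hB2 : gFold (toGroups s) (0, 0) = amFold c ((toGroups s).map (·.1)) (0, 0) :=
    gFold_amFold c (toGroups s) (0, 0) hcnt
  -- the distinct ascending bucket values are exactly the nonzero-count range entries
  have hV : (PySem.List.pyRange 0 ((n : Int) + 1)).filter (fun i => decide (c i ≠ 0))
      = (toGroups s).map (·.1) := by
    have hpw1 : ((PySem.List.pyRange 0 ((n : Int) + 1)).filter (fun i => decide (c i ≠ 0))).Pairwise (· < ·) :=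
      (PySem.List.pairwise_lt_pyRange_one 0 ((n : Int) + 1)).filter _
    have hpw2 : ((toGroups s).map (·.1)).Pairwise (· < ·) :=
      List.Pairwise.map _ (fun a b hh => hh) (toGroups_pairwise s hssort)
    have hmem : ∀ x, x ∈ (PySem.List.pyRange 0 ((n : Int) + 1)).filter (fun i => decide (c i ≠ 0))
        ↔ x ∈ (toGroups s).map (·.1) := by
      intro x
      rw [List.mem_filter, PySem.List.mem_pyRange_one]
      constructor
      · rintro ⟨⟨h0, h1⟩, hcx⟩
        have hxs : x ∈ buckets0 := by
          by_contra hns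
          have h2 : buckets0.count x = 0 := List.count_eq_zero.mpr hns
          simp [hc, h2] at hcx
        exact mem_mem_toGroups s x (hsperm.mem_iff.mpr hxs)
      · intro hx
        obtain ⟨g', hg', rfl⟩ := List.mem_map.mp hx
        have hxb : g'.1 ∈ buckets0 := hsperm.mem_iff.mp (mem_toGroups_mem s g' hg')
        refine ⟨⟨(hbnd _ hxb).1, by have := (hbnd _ hxb).2; omega⟩, ?_⟩
        have h2 : buckets0.count g'.1 ≠ 0 := by
          simp [List.count_eq_zero]
          exact hxb
        simp [hc, h2]
    have hperm : ((PySem.List.pyRange 0 ((n : Int) + 1)).filter (fun i => decide (c i ≠ 0))).Perm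
        ((toGroups s).map (·.1)) :=
      (List.perm_ext_iff_of_nodup (hpw1.imp ne_of_lt) (hpw2.imp ne_of_lt)).mpr hmem
    exact hperm.eq_of_pairwise (fun a b _ _ ha hb' => le_antisymm ha hb')
      (hpw1.imp le_of_lt) (hpw2.imp le_of_lt)
  have hAB : (s.foldl rsStep ((0 : Int), (0 : Int), (0 : Int), (none : Option Int))).1
      = (amFold c (PySem.List.pyRange 0 ((n : Int) + 1)) (0, 0)).1 := by
    rw [hB1, hB2, ← hV, ← amFold_filter c hc0 _ (0, 0) le_rfl]
  rw [hA, hAB]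


-- ===== VERDICT (by name: the statement is the Claim_ definition above) =====
theorem get_biggest_category_index_spec : Claim_equal_get_biggest_category_index := by
  intro g ws _ hpre
  unfold Spec_get_biggest_category_index
  exact (main_eq g ws hpre.2).symm ▸ rfl
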